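-- pv_equiv track=rewrite | github.com/udaybhaskar578/Hacker-Rank-Challenges | Strings/Easy/TwoCharacters.py | CheckForT
-- ===== SOURCE A (Python) =====
-- def CheckForT(s):
--     c = list(s)
--     i=0
--     if len(c) == 2:
--         if c[0] == c[1]:
--             return False
--         else:
--             return True
--     while i < len(c)-2:
--         if c[i] == c[i+2] and c[i]!=c[i+1]:
--             i = i+1
--             continue
--         elif c[i] == c[i+1]:
--             return False
--         else:
--             return False
--     return True
-- ===== SOURCE B (Python) =====
-- def CheckForT(s):
--     return len(set(s)) <= 2 and all(a != b for a, b in zip(s, s[1:]))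
-- ===== Notes on version B (the rewrite author's own statement) =====
-- stated objective: simpler
-- what changed: Replaces the index-pair while loop (comparing s[i] with s[i+2] and s[i+1], plus a special case for length 2) by two global conditions: at most two distinct characters and no equal adjacent pair.
import Mathlib
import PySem

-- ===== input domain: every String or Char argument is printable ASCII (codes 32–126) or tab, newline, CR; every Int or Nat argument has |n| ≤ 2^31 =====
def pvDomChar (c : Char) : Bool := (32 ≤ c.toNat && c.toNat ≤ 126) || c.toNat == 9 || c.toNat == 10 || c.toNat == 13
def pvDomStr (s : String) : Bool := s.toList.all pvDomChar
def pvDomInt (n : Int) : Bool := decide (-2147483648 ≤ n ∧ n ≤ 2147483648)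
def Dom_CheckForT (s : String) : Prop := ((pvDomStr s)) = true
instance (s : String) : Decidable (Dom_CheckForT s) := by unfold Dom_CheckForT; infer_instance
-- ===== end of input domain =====

-- B replaces A's index-pair while loop (with its separate length-2 case) by two global checks — at most two distinct characters and no equal adjacent pair — for a simpler implementation of the same cost.


-- ===== PORT A =====
def CheckForT_loop (c : List Char) (i : Nat) : Bool :=
  if i < c.length - 2 then
    if c.getD i ' ' == c.getD (i+2) ' ' && !(c.getD i ' ' == c.getD (i+1) ' ') then
      CheckForT_loop c (i+1)
    else false
  else true
termination_by c.length - i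
decreasing_by omega

def CheckForT (s : String) : Bool :=
  let c := s.toList
  if c.length = 2 then
    if c.getD 0 ' ' == c.getD 1 ' ' then false else true
  else CheckForT_loop c 0

-- ===== PORT B =====
def CheckForT_alt (s : String) : Bool :=
  decide ((PySem.Set.ofList s.toList).length ≤ 2) &&
  (List.zip s.toList s.toList.tail).all (fun p => p.1 != p.2)

-- ===== PRECONDITION & SPEC =====
def Spec_CheckForT (s : String) (out : Bool) : Prop := out = CheckForT_alt s
instance (s : String) (out : Bool) : Decidable (Spec_CheckForT s out) := by unfold Spec_CheckForT; infer_instance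

-- ===== CLAIM =====
def Claim_equal_CheckForT : Prop := ∀ (s : String), Dom_CheckForT s → Spec_CheckForT s (CheckForT s)

-- ===== LEMMAS AND PROOFS =====
theorem CheckForT_loop_iff (c : List Char) (i : Nat) :
    CheckForT_loop c i = true ↔
      ∀ j, i ≤ j → j + 2 < c.length →
        c.getD j ' ' = c.getD (j+2) ' ' ∧ c.getD j ' ' ≠ c.getD (j+1) ' ' := by
  induction i using CheckForT_loop.induct (c := c) with
  | case1 i hlt hcond ih =>
    rw [CheckForT_loop, if_pos hlt, if_pos hcond, ih]
    simp only [Bool.and_eq_true, beq_iff_eq, Bool.not_eq_true', beq_eq_false_iff_ne] at hcond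
    constructor
    · intro h j hij hj2
      rcases Nat.eq_or_lt_of_le hij with rfl | hlt'
      · exact hcond
      · exact h j hlt' hj2
    · intro h j hij hj2; exact h j (Nat.le_of_succ_le hij) hj2
  | case2 i hlt hcond =>
    rw [CheckForT_loop, if_pos hlt, if_neg hcond]
    simp only [Bool.and_eq_true, beq_iff_eq, Bool.not_eq_true', beq_eq_false_iff_ne, not_and_or] at hcond
    constructor
    · intro h; cases h
    · intro h
      have := h i le_rfl (by omega)
      rcases hcond with h1 | h2
      · exact absurd this.1 h1
      · exact absurd this.2 (by simpa using h2)
  | case3 i hlt =>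
    rw [CheckForT_loop, if_neg hlt]
    constructor
    · intro _ j hij hj2; omega
    · intro _; rfl

theorem zip_all_iff (c : List Char) :
    ((List.zip c c.tail).all (fun p => p.1 != p.2)) = true ↔
      ∀ j, j + 1 < c.length → c.getD j ' ' ≠ c.getD (j+1) ' ' := by
  induction c with
  | nil => simp
  | cons a t ih =>
    cases t with
    | nil => simp
    | cons b u =>
      simp only [List.tail_cons, List.zip_cons_cons, List.all_cons, Bool.and_eq_true, bne_iff_ne, ne_eq]
      rw [show (List.zip (b::u) u) = (List.zip (b::u) (b::u).tail) from rfl] at *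
      rw [ih]
      constructor
      · rintro ⟨hab, h⟩ j hj
        cases j with
        | zero => simpa using hab
        | succ k =>
          simp only [List.getD_cons_succ]
          exact h k (by simpa [Nat.succ_lt_succ_iff] using hj)
      · intro h
        refine ⟨by simpa using h 0 (by simp), ?_⟩
        intro k hk
        have := h (k+1) (by simpa [Nat.succ_lt_succ_iff] using hk)
        simpa using this

theorem set_len_le_two (c : List Char)
    (h : ∀ x ∈ c, x = c.getD 0 ' ' ∨ x = c.getD 1 ' ') :
    (PySem.Set.ofList c).length ≤ 2 := by
  have hnd : (PySem.Set.ofList c).Nodup := PySem.Set.nodup_ofList c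
  have hcard := List.toFinset_card_of_nodup hnd
  have hsub : (PySem.Set.ofList c).toFinset ⊆ {c.getD 0 ' ', c.getD 1 ' '} := by
    intro x hx
    simp only [List.mem_toFinset, PySem.Set.mem_ofList] at hx
    simpa using h x hx
  calc (PySem.Set.ofList c).length = (PySem.Set.ofList c).toFinset.card := hcard.symm
    _ ≤ ({c.getD 0 ' ', c.getD 1 ' '} : Finset Char).card := Finset.card_le_card hsub
    _ ≤ 2 := Finset.card_insert_le _ _ |>.trans (by simp)

theorem set_len_ge_three (c : List Char) {x y z : Char}
    (hx : x ∈ c) (hy : y ∈ c) (hz : z ∈ c)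
    (hxy : x ≠ y) (hxz : x ≠ z) (hyz : y ≠ z) :
    3 ≤ (PySem.Set.ofList c).length := by
  have hnd : (PySem.Set.ofList c).Nodup := PySem.Set.nodup_ofList c
  have hcard := List.toFinset_card_of_nodup hnd
  have hsub : ({x, y, z} : Finset Char) ⊆ (PySem.Set.ofList c).toFinset := by
    intro w hw
    simp only [List.mem_toFinset, PySem.Set.mem_ofList]
    rcases Finset.mem_insert.1 hw with rfl | hw
    · exact hx
    rcases Finset.mem_insert.1 hw with rfl | hw
    · exact hy
    · simp only [Finset.mem_singleton] at hw; subst hw; exact hz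
  have h3 : ({x, y, z} : Finset Char).card = 3 := by
    rw [Finset.card_insert_of_notMem (by simp [hxy, hxz]),
        Finset.card_insert_of_notMem (by simp [hyz]), Finset.card_singleton]
  calc 3 = ({x, y, z} : Finset Char).card := h3.symm
    _ ≤ (PySem.Set.ofList c).toFinset.card := Finset.card_le_card hsub
    _ = (PySem.Set.ofList c).length := hcard

theorem getD_mod2 (c : List Char)
    (h : ∀ j, j + 2 < c.length → c.getD j ' ' = c.getD (j+2) ' ') :
    ∀ k, k < c.length → c.getD k ' ' = c.getD (k % 2) ' ' := by
  intro k
  induction k using Nat.strong_induction_on with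
  | _ k ih =>
    intro hk
    rcases Nat.lt_or_ge k 2 with h2 | h2
    · have : k % 2 = k := Nat.mod_eq_of_lt h2
      rw [this]
    · have he : c.getD (k-2) ' ' = c.getD k ' ' := by
        have := h (k-2) (by omega)
        rwa [show k - 2 + 2 = k by omega] at this
      have := ih (k-2) (by omega) (by omega)
      rw [← he, this, show (k-2) % 2 = k % 2 by omega]

theorem main_iff (c : List Char) (hn : c.length ≠ 2) :
    (∀ j, j + 2 < c.length →
       c.getD j ' ' = c.getD (j+2) ' ' ∧ c.getD j ' ' ≠ c.getD (j+1) ' ') ↔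
    ((PySem.Set.ofList c).length ≤ 2 ∧
     ∀ j, j + 1 < c.length → c.getD j ' ' ≠ c.getD (j+1) ' ') := by
  rcases Nat.lt_or_ge c.length 2 with hs | hs
  · constructor
    · intro _
      refine ⟨set_len_le_two c ?_, by intro j hj; omega⟩
      intro x hx
      obtain ⟨k, hk, hxk⟩ := List.mem_iff_getElem.1 hx
      left
      have h0 : k = 0 := by omega
      subst h0
      rw [← hxk, List.getD_eq_getElem c ' ' hk]
    · intro _ j hj
      omega
  · have hs3 : 3 ≤ c.length := by omega
    constructor
    · intro h
      have hneigh : ∀ j, j + 1 < c.length → c.getD j ' ' ≠ c.getD (j+1) ' ' := by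
        intro j hj
        rcases Nat.lt_or_ge (j+2) c.length with hj2 | hj2
        · exact (h j hj2).2
        · have hj1 : 1 ≤ j := by omega
          obtain ⟨he, hne⟩ := h (j-1) (by omega)
          rw [show j - 1 + 2 = j + 1 by omega] at he
          rw [show j - 1 + 1 = j by omega] at hne
          rw [← he]
          exact fun hc => hne hc.symm
      refine ⟨set_len_le_two c ?_, hneigh⟩
      intro x hx
      obtain ⟨k, hk, hxk⟩ := List.mem_iff_getElem.1 hx
      have hx' : x = c.getD k ' ' := by rw [List.getD_eq_getElem c ' ' hk, hxk]
      have := getD_mod2 c (fun j hj => (h j hj).1) k hk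
      rw [hx', this]
      rcases Nat.mod_two_eq_zero_or_one k with h0 | h1
      · left; rw [h0]
      · right; rw [h1]
    · rintro ⟨hset, hneigh⟩ j hj
      have h01 : c.getD j ' ' ≠ c.getD (j+1) ' ' := hneigh j (by omega)
      have h12 : c.getD (j+1) ' ' ≠ c.getD (j+2) ' ' := hneigh (j+1) (by omega)
      refine ⟨?_, h01⟩
      by_contra h02
      have hm : ∀ i, i < c.length → c.getD i ' ' ∈ c := by
        intro i hi; rw [List.getD_eq_getElem c ' ' hi]; exact List.getElem_mem hi
      have := set_len_ge_three c (hm j (by omega)) (hm (j+1) (by omega)) (hm (j+2) (by omega))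
        h01 h02 h12
      omega

theorem CheckForT_eq (s : String) : CheckForT s = CheckForT_alt s := by
  unfold CheckForT CheckForT_alt
  set c := s.toList with hc
  by_cases h2 : c.length = 2
  · rw [if_pos h2]
    obtain ⟨a, b, hab⟩ := List.length_eq_two.1 h2
    rw [hab]
    have hset : (PySem.Set.ofList [a, b]).length ≤ 2 := by
      apply set_len_le_two
      intro x hx
      rcases List.mem_pair.1 hx with rfl | rfl
      · left; rfl
      · right; rfl
    by_cases hab' : a = b <;>
      simp [hab', hset]
  · rw [if_neg h2]
    rcases Bool.eq_false_or_eq_true (CheckForT_loop c 0) with hl | hl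
    · rw [hl]
      have hall := (CheckForT_loop_iff c 0).1 hl
      have := (main_iff c h2).1 (fun j hj => hall j (Nat.zero_le j) hj)
      rw [← zip_all_iff c] at this
      symm
      simp [this.1, this.2]
    · rw [hl]
      have hnot : ¬ ∀ j, j + 2 < c.length →
          c.getD j ' ' = c.getD (j+2) ' ' ∧ c.getD j ' ' ≠ c.getD (j+1) ' ' := by
        intro h
        have := (CheckForT_loop_iff c 0).2 (fun j _ => h j)
        rw [hl] at this
        exact Bool.false_ne_true this
      rw [main_iff c h2] at hnot
      rcases not_and_or.1 hnot with h | h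
      · symm
        simp [h]
      · rw [← zip_all_iff c] at h
        simp only [Bool.not_eq_true] at h
        rw [h, Bool.and_false]

-- ===== VERDICT =====
theorem CheckForT_spec : Claim_equal_CheckForT := fun s _ => CheckForT_eq s
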